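-- pv_equiv track=rewrite | github.com/tkoz0/problems-hackerrank | array-splitting.py | arraySplitting
-- ===== SOURCE A (Python) =====
-- def arraySplitting(arr):
--     # Write your code here
--     if all(a == 0 for a in arr):
--         return len(arr)-1
--     arr = [a for a in arr if a > 0]
--     def recur(i,j):
--         if i == j:
--             return 0
--         s = 0
--         ps = []
--         for k in range(i,j+1):
--             s += arr[k]
--             ps.append(s)
--         for k,psk in enumerate(ps):
--             if psk == ps[-1] - psk:
--                 l = recur(i,i+k)
--                 r = recur(i+k+1,j)
--                 return 1+max(l,r)
--         return 0
--     return recur(0,len(arr)-1)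
-- ===== SOURCE B (Python) =====
-- def arraySplitting(arr):
--     if all(a == 0 for a in arr):
--         return len(arr) - 1
--     # prefix sums of the positive elements, computed once
--     P = [0]
--     for a in arr:
--         if a > 0:
--             P.append(P[-1] + a)
--     def depth(lo, hi):
--         # segment of positives with prefix indices lo..hi
--         if hi - lo <= 1:
--             return 0
--         s = P[hi] - P[lo]
--         if s % 2:
--             return 0
--         t = P[lo] + s // 2
--         # binary search for t among the strictly increasing P[lo+1..hi-1]
--         a, b = lo + 1, hi
--         while a < b:
--             m = (a + b) // 2
--             if P[m] < t:
--                 a = m + 1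
--             else:
--                 b = m
--         if a < hi and P[a] == t:
--             return 1 + max(depth(lo, a), depth(a, hi))
--         return 0
--     return depth(0, len(P) - 1)
-- ===== Notes on version B (the rewrite author's own statement) =====
-- stated objective: faster
-- what changed: B computes one global prefix-sum array of the positive elements once and finds each half-sum split point by binary search, instead of A rebuilding the segment's prefix-sum list and linearly scanning it on every recursive call.
import Mathlib
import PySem

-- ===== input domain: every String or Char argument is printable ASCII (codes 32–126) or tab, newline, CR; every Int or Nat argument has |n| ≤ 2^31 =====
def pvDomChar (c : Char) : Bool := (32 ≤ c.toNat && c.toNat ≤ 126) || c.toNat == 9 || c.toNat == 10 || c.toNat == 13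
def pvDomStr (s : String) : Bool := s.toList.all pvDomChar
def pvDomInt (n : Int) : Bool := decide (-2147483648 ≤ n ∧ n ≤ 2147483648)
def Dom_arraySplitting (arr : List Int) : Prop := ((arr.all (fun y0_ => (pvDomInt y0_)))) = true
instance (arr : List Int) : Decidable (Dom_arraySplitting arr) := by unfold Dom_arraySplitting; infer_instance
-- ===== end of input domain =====

-- B replaces A's per-call rebuild of segment prefix sums and linear scan by one global
-- prefix-sum array computed once plus a binary search for the unique half-sum split point.

-- ===== PORT A =====
-- inner 'recur(i,j)': fuel makes the recursion total; with fuel > segment length it never runs out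
def recurA (arr : List Int) : Nat → Int → Int → Int
  | 0, _, _ => 0
  | f+1, i, j =>
    if i = j then 0
    else
      let ps := ((PySem.List.pyRange i (j+1) 1).foldl
        (fun (sp : Int × List Int) k =>
          (sp.1 + PySem.List.pyGetD arr k 0, sp.2 ++ [sp.1 + PySem.List.pyGetD arr k 0]))
        ((0:Int), ([] : List Int))).2
      match ps.findIdx? (fun psk => psk == PySem.List.pyGetD ps (-1) 0 - psk) with
      | some k => 1 + max (recurA arr f i (i + (k:Int))) (recurA arr f (i + (k:Int) + 1) j)
      | none => 0

def arraySplitting (arr : List Int) : Int :=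
  if arr.all (fun a => a == 0) then (arr.length : Int) - 1
  else
    let arr2 := arr.filter (fun a => 0 < a)
    recurA arr2 (arr2.length + 1) 0 ((arr2.length : Int) - 1)

-- ===== PORT B =====
-- 'while a < b: m = (a+b)//2; …' binary search loop of Source B
def bisectLoop (P : List Int) (t : Int) (a b : Nat) : Nat :=
  if h : a < b then
    let m := (a + b) / 2
    if PySem.List.pyGetD P (m : Int) 0 < t then bisectLoop P t (m+1) b else bisectLoop P t a m
  else a
termination_by b - a
decreasing_by all_goals omega

-- inner 'depth(lo,hi)' of Source B; fuel makes the recursion total, never exhausted for fuel > hi-lo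
def depthB (P : List Int) : Nat → Nat → Nat → Int
  | 0, _, _ => 0
  | f+1, lo, hi =>
    if hi - lo ≤ 1 then 0
    else
      let s := PySem.List.pyGetD P (hi:Int) 0 - PySem.List.pyGetD P (lo:Int) 0
      if PySem.Int.mod s 2 ≠ 0 then 0
      else
        let t := PySem.List.pyGetD P (lo:Int) 0 + PySem.Int.floordiv s 2
        let a := bisectLoop P t (lo+1) hi
        if a < hi ∧ PySem.List.pyGetD P (a:Int) 0 = t then
          1 + max (depthB P f lo a) (depthB P f a hi)
        else 0

def buildP (arr : List Int) : List Int :=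
  arr.foldl (fun P a => if 0 < a then P ++ [PySem.List.pyGetD P (-1) 0 + a] else P) [0]

def arraySplitting_alt (arr : List Int) : Int :=
  if arr.all (fun a => a == 0) then (arr.length : Int) - 1
  else
    let P := buildP arr
    depthB P P.length 0 (P.length - 1)

-- ===== PRECONDITION & SPEC =====
def Spec_arraySplitting (arr : List Int) (out : Int) : Prop := out = arraySplitting_alt arr
instance (arr : List Int) (out : Int) : Decidable (Spec_arraySplitting arr out) := by unfold Spec_arraySplitting; infer_instance

-- ===== CLAIM (what is proved, stated in full; the proofs are below) =====
def Claim_equal_arraySplitting : Prop := ∀ (arr : List Int), Dom_arraySplitting arr → Spec_arraySplitting arr (arraySplitting arr)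

-- ===== LEMMAS AND PROOFS =====

-- prefix sums of l shifted by s (proof-side abbreviation for what both loops build)
def prefFrom (s : Int) : List Int → List Int
  | [] => []
  | a :: l => (s + a) :: prefFrom (s + a) l

theorem length_prefFrom (s : Int) (l : List Int) : (prefFrom s l).length = l.length := by
  induction l generalizing s with
  | nil => rfl
  | cons a l ih => simp [prefFrom, ih]

theorem getElem_prefFrom (s : Int) (l : List Int) (k : Nat) (hk : k < l.length) :
    (prefFrom s l)[k]'(by simpa [length_prefFrom] using hk) = s + (l.take (k+1)).sum := by
  induction l generalizing s k with
  | nil => simp at hk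
  | cons a l ih =>
    cases k with
    | zero => simp [prefFrom]
    | succ k =>
      simp only [prefFrom, List.getElem_cons_succ, List.take_succ_cons, List.sum_cons]
      rw [ih (s+a) k (by simpa using hk)]
      ring

theorem buildP_go (l : List Int) : ∀ (Q : List Int) (x : Int),
    l.foldl (fun P a => if 0 < a then P ++ [PySem.List.pyGetD P (-1) 0 + a] else P) (Q ++ [x])
      = (Q ++ [x]) ++ prefFrom x (l.filter (fun a => 0 < a)) := by
  induction l with
  | nil => intro Q x; simp [prefFrom]
  | cons a l ih =>
    intro Q x
    by_cases ha : 0 < a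
    · simp only [List.foldl_cons, List.filter_cons, ha, decide_true, if_true,
        PySem.List.pyGetD_neg_one_append_singleton, prefFrom]
      have := ih (Q ++ [x]) (x + a)
      rw [this]
      simp
    · simp only [List.foldl_cons, List.filter_cons, ha, decide_false, if_false,
        Bool.false_eq_true]
      exact ih Q x

theorem buildP_eq (arr : List Int) :
    buildP arr = [0] ++ prefFrom 0 (arr.filter (fun a => 0 < a)) := by
  have := buildP_go arr [] 0
  simpa [buildP] using this

-- A's inner prefix-sum building loop, on consecutive indices of arr
theorem foldPS (arr : List Int) (d : Nat) : ∀ (lo : Nat) (s : Int) (acc : List Int),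
    lo + d ≤ arr.length →
    ((PySem.List.pyRange (lo:Int) ((lo:Int)+(d:Int)) 1).foldl
      (fun (sp : Int × List Int) k =>
        (sp.1 + PySem.List.pyGetD arr k 0, sp.2 ++ [sp.1 + PySem.List.pyGetD arr k 0]))
      (s, acc)).2
      = acc ++ prefFrom s ((arr.drop lo).take d) := by
  induction d with
  | zero =>
    intro lo s acc _
    rw [PySem.List.pyRange_one_eq_nil (by omega)]
    simp [prefFrom]
  | succ d ih =>
    intro lo s acc hlen
    have hlo : lo < arr.length := by omega
    rw [PySem.List.pyRange_one_cons (by push_cast; omega)]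
    simp only [List.foldl_cons]
    have hg : PySem.List.pyGetD arr (lo:Int) 0 = arr[lo] := by
      simp [PySem.List.pyGetD_natCast, List.getD_eq_getElem?_getD, hlo]
    rw [hg]
    have hcast : (lo:Int) + 1 = ((lo+1 : Nat) : Int) := by push_cast; ring
    have hcast2 : (lo:Int) + ((d+1 : Nat) : Int) = ((lo+1 : Nat) : Int) + (d : Int) := by
      push_cast; ring
    rw [hcast2, hcast]
    rw [ih (lo+1) (s + arr[lo]) (acc ++ [s + arr[lo]]) (by omega)]
    have hseg : List.take (d+1) (List.drop lo arr) = arr[lo] :: List.take d (List.drop (lo+1) arr) := by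
      rw [List.drop_eq_getElem_cons hlo, List.take_succ_cons]
    rw [hseg, prefFrom]
    simp

-- bisectLoop spec on a list strictly increasing up to index n0
theorem bisectLoop_spec (P : List Int) (t : Int) (n0 : Nat)
    (hmono : ∀ x y : Nat, x < y → y ≤ n0 → PySem.List.pyGetD P (x:Int) 0 < PySem.List.pyGetD P (y:Int) 0) :
    ∀ a b : Nat, a ≤ b → b ≤ n0 →
      a ≤ bisectLoop P t a b ∧ bisectLoop P t a b ≤ b ∧
      (∀ x : Nat, a ≤ x → x < bisectLoop P t a b → PySem.List.pyGetD P (x:Int) 0 < t) ∧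
      (bisectLoop P t a b < b → ¬ PySem.List.pyGetD P ((bisectLoop P t a b : Nat):Int) 0 < t) := by
  have H : ∀ (fuel a b : Nat), b - a ≤ fuel → a ≤ b → b ≤ n0 →
      a ≤ bisectLoop P t a b ∧ bisectLoop P t a b ≤ b ∧
      (∀ x : Nat, a ≤ x → x < bisectLoop P t a b → PySem.List.pyGetD P (x:Int) 0 < t) ∧
      (bisectLoop P t a b < b → ¬ PySem.List.pyGetD P ((bisectLoop P t a b : Nat):Int) 0 < t) := by
    intro fuel
    induction fuel with
    | zero =>
      intro a b hf hab hbn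
      have hba : b = a := by omega
      subst hba
      rw [bisectLoop, dif_neg (lt_irrefl b)]
      exact ⟨le_rfl, le_rfl, fun x h1 h2 => absurd (h1.trans_lt h2) (lt_irrefl b),
        fun h => absurd h (lt_irrefl b)⟩
    | succ fuel ih =>
      intro a b hf hab hbn
      rw [bisectLoop]
      by_cases h : a < b
      · simp only [h, dif_pos]
        by_cases hm : PySem.List.pyGetD P (((a + b) / 2 : Nat) : Int) 0 < t
        · simp only [hm, if_pos]
          obtain ⟨h1, h2, h3, h4⟩ := ih ((a+b)/2 + 1) b (by omega) (by omega) hbn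
          refine ⟨by omega, h2, ?_, h4⟩
          intro x hax hxr
          by_cases hx2 : x < (a+b)/2
          · exact lt_trans (hmono x ((a+b)/2) hx2 (by omega)) hm
          · by_cases hx3 : x = (a+b)/2
            · rw [hx3]; exact hm
            · exact h3 x (by omega) hxr
        · simp only [hm, if_false]
          obtain ⟨h1, h2, h3, h4⟩ := ih a ((a+b)/2) (by omega) (by omega) (by omega)
          refine ⟨h1, by omega, h3, ?_⟩
          intro hrb
          by_cases hr : bisectLoop P t a ((a+b)/2) < (a+b)/2
          · exact h4 hr
          · have : bisectLoop P t a ((a+b)/2) = (a+b)/2 := by omega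
            rw [this]
            exact hm
      · rw [dif_neg h]
        exact ⟨le_rfl, hab, fun x h1 h2 => absurd (h1.trans_lt h2) (lt_irrefl a),
          fun hr => absurd hr h⟩
  intro a b hab hbn
  exact H (b - a) a b le_rfl hab hbn

def Pf (l : List Int) (m : Nat) : Int := (l.take m).sum

theorem Pf_lt (l : List Int) (hpos : ∀ x ∈ l, 0 < x) :
    ∀ x y : Nat, x < y → y ≤ l.length → Pf l x < Pf l y := by
  intro x y hxy hyl
  induction y with
  | zero => omega
  | succ y ihy =>
    have hyl' : y < l.length := by omega
    have hstep : Pf l (y+1) = Pf l y + l[y] := by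
      unfold Pf
      rw [List.take_add_one]
      simp only [List.sum_append, List.getElem?_eq_getElem hyl', Option.toList_some,
        List.sum_cons, List.sum_nil]
      ring
    have hy : 0 < l[y] := hpos _ (List.getElem_mem hyl')
    rcases Nat.lt_or_ge x y with h | h
    · have := ihy h (by omega)
      omega
    · have hxey : x = y := by omega
      subst hxey
      omega

theorem getP (arr2 : List Int) (m : Nat) (hm : m ≤ arr2.length) :
    PySem.List.pyGetD ([0] ++ prefFrom 0 arr2) (m:Int) 0 = Pf arr2 m := by
  rw [PySem.List.pyGetD_natCast]
  cases m with
  | zero => simp [Pf]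
  | succ k =>
    have hk : k < (prefFrom 0 arr2).length := by rw [length_prefFrom]; omega
    simp only [List.singleton_append, List.getD_cons_succ]
    rw [List.getD_eq_getElem _ _ hk, getElem_prefFrom 0 arr2 k (by omega)]
    simp [Pf]

theorem main_lemma (arr2 : List Int) (hpos : ∀ x ∈ arr2, 0 < x)
    (P : List Int) (hP : P = [0] ++ prefFrom 0 arr2) :
    ∀ (fA : Nat), ∀ (fB lo hi : Nat), lo ≤ hi → hi ≤ arr2.length → hi - lo < fA → hi - lo < fB →
    recurA arr2 fA (lo:Int) ((hi:Int) - 1) = depthB P fB lo hi := by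
  intro fA
  induction fA with
  | zero => intro fB lo hi _ _ h3 _; omega
  | succ f ih =>
    intro fB lo hi hle hhn hfa hfb
    cases fB with
    | zero => omega
    | succ g =>
    have hPm : ∀ m : Nat, m ≤ arr2.length → PySem.List.pyGetD P (m:Int) 0 = Pf arr2 m := by
      intro m hm; rw [hP]; exact getP arr2 m hm
    have hmonoP : ∀ x y : Nat, x < y → y ≤ arr2.length →
        PySem.List.pyGetD P (x:Int) 0 < PySem.List.pyGetD P (y:Int) 0 := by
      intro x y hxy hyn
      rw [hPm x (by omega), hPm y hyn]
      exact Pf_lt arr2 hpos x y hxy hyn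
    by_cases hsmall : hi ≤ lo + 1
    · -- segments of length 0 or 1: both sides return 0 (resp. both hit the i = j base case)
      rcases Nat.eq_or_lt_of_le hle with heq | hlt
      · -- hi = lo
        subst heq
        simp only [recurA, depthB]
        rw [if_neg (by omega : ¬ ((lo:Int)) = ((lo:Int) - 1))]
        rw [show ((lo:Int) - 1) + 1 = (lo:Int) by ring, PySem.List.pyRange_one_eq_nil le_rfl]
        simp
      · -- hi = lo + 1
        have heq : hi = lo + 1 := by omega
        subst heq
        simp only [recurA, depthB]
        rw [if_pos (by push_cast; ring : ((lo:Int)) = (((lo+1 : Nat)):Int) - 1)]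
        simp
    · -- segments of length ≥ 2
      have hlo2 : lo + 2 ≤ hi := by omega
      simp only [recurA, depthB]
      rw [if_neg (by omega : ¬ ((lo:Int)) = ((hi:Int) - 1))]
      rw [show ((hi:Int) - 1) + 1 = (lo:Int) + (((hi - lo : Nat)):Int) by omega]
      rw [foldPS arr2 (hi - lo) lo 0 [] (by omega)]
      simp only [List.nil_append]
      have hseglen : ((arr2.drop lo).take (hi - lo)).length = hi - lo := by
        rw [List.length_take, List.length_drop]; omega
      have hpslen : (prefFrom 0 ((arr2.drop lo).take (hi - lo))).length = hi - lo := by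
        rw [length_prefFrom, hseglen]
      have hpsget : ∀ k : Nat, (hk : k < hi - lo) →
          (prefFrom 0 ((arr2.drop lo).take (hi - lo)))[k]'(by rw [hpslen]; omega)
            = Pf arr2 (lo+k+1) - Pf arr2 lo := by
        intro k hk
        rw [getElem_prefFrom 0 _ k (by rw [hseglen]; omega)]
        rw [List.take_take, min_eq_left (by omega : k+1 ≤ hi - lo)]
        have : arr2.take (lo + (k+1)) = arr2.take lo ++ (arr2.drop lo).take (k+1) :=
          List.take_add
        unfold Pf
        rw [show lo + k + 1 = lo + (k+1) by omega, this, List.sum_append]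
        ring
      have hpsne : (prefFrom 0 ((arr2.drop lo).take (hi - lo))) ≠ [] := by
        intro h; rw [h] at hpslen; simp at hpslen; omega
      have hlast : PySem.List.pyGetD (prefFrom 0 ((arr2.drop lo).take (hi - lo))) (-1) 0
          = Pf arr2 hi - Pf arr2 lo := by
        rw [PySem.List.pyGetD_neg_one _ 0 hpsne, List.getLast_eq_getElem]
        have h1 := hpsget ((prefFrom 0 ((arr2.drop lo).take (hi - lo))).length - 1) (by omega)
        rw [h1]
        congr 2
        omega
      have hS0 : 0 < Pf arr2 hi - Pf arr2 lo := by
        have := Pf_lt arr2 hpos lo hi (by omega) hhn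
        omega
      rw [if_neg (by omega : ¬ hi - lo ≤ 1)]
      rw [hlast, hPm hi hhn, hPm lo (by omega)]
      by_cases hsplit : ∃ m : Nat, lo < m ∧ m < hi ∧
          Pf arr2 m * 2 = Pf arr2 lo + Pf arr2 hi
      · obtain ⟨m, hm1, hm2, hm3⟩ := hsplit
        -- A finds the unique split index m - lo - 1
        have hfind : (prefFrom 0 ((arr2.drop lo).take (hi - lo))).findIdx?
            (fun psk => psk == Pf arr2 hi - Pf arr2 lo - psk) = some (m - lo - 1) := by
          rw [List.findIdx?_eq_some_iff_getElem]
          refine ⟨by omega, ?_, ?_⟩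
          · have hk := hpsget (m - lo - 1) (by omega)
            rw [show lo + (m - lo - 1) + 1 = m by omega] at hk
            simp only [hk, beq_iff_eq]
            omega
          · intro j hj
            have hk := hpsget j (by omega)
            simp only [hk, beq_iff_eq]
            have := Pf_lt arr2 hpos (lo+j+1) m (by omega) (by omega)
            omega
        rw [hfind]
        have hmod : PySem.Int.mod (Pf arr2 hi - Pf arr2 lo) 2 = 0 := by
          rw [PySem.Int.mod_eq_emod_of_pos (by norm_num)]
          omega
        rw [if_neg (not_not_intro hmod)]
        have hdiv : PySem.Int.floordiv (Pf arr2 hi - Pf arr2 lo) 2 = Pf arr2 m - Pf arr2 lo := by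
          rw [PySem.Int.floordiv_eq_ediv_of_pos (by norm_num)]
          omega
        rw [hdiv, show Pf arr2 lo + (Pf arr2 m - Pf arr2 lo) = Pf arr2 m by ring]
        obtain ⟨b1, b2, b3, b4⟩ :=
          bisectLoop_spec P (Pf arr2 m) arr2.length hmonoP (lo+1) hi (by omega) hhn
        have hr : bisectLoop P (Pf arr2 m) (lo+1) hi = m := by
          rcases lt_trichotomy (bisectLoop P (Pf arr2 m) (lo+1) hi) m with h | h | h
          · exfalso
            have hrhi : bisectLoop P (Pf arr2 m) (lo+1) hi < hi := by omega
            have h4 := b4 hrhi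
            have hlt := hmonoP (bisectLoop P (Pf arr2 m) (lo+1) hi) m h (by omega)
            rw [hPm m (by omega)] at hlt
            omega
          · exact h
          · exfalso
            have h3 := b3 m (by omega) h
            rw [hPm m (by omega)] at h3
            omega
        rw [hr]
        rw [if_pos ⟨by omega, by rw [hPm m (by omega)]⟩]
        have hleft := ih g lo m (by omega) (by omega) (by omega) (by omega)
        have hright := ih g m hi (by omega) hhn (by omega) (by omega)
        have hcast1 : (lo:Int) + ((m - lo - 1 : Nat):Int) = ((m:Nat):Int) - 1 := by omega
        have hcast2 : (lo:Int) + ((m - lo - 1 : Nat):Int) + 1 = ((m:Nat):Int) := by omega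
        simp only [hcast1, hleft]
        rw [show ((m:Nat):Int) - 1 + 1 = ((m:Nat):Int) by ring, hright]
      · -- no split point: both sides return 0
        have hfind : (prefFrom 0 ((arr2.drop lo).take (hi - lo))).findIdx?
            (fun psk => psk == Pf arr2 hi - Pf arr2 lo - psk) = none := by
          rw [List.findIdx?_eq_none_iff]
          intro x hx
          obtain ⟨k, hk, rfl⟩ := List.mem_iff_getElem.mp hx
          have hk' : k < hi - lo := by omega
          have hkk := hpsget k hk'
          simp only [hkk, beq_eq_false_iff_ne, ne_eq]
          intro heq
          rcases Nat.lt_or_ge (lo+k+1) hi with h | h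
          · exact hsplit ⟨lo+k+1, by omega, h, by omega⟩
          · have hkhi : lo + k + 1 = hi := by omega
            rw [hkhi] at heq
            omega
        rw [hfind]
        by_cases hmod : PySem.Int.mod (Pf arr2 hi - Pf arr2 lo) 2 = 0
        · rw [if_neg (not_not_intro hmod)]
          rw [PySem.Int.mod_eq_emod_of_pos (by norm_num)] at hmod
          obtain ⟨b1, b2, b3, b4⟩ := bisectLoop_spec P
            (Pf arr2 lo + PySem.Int.floordiv (Pf arr2 hi - Pf arr2 lo) 2)
            arr2.length hmonoP (lo+1) hi (by omega) hhn
          have hcond : ¬ (bisectLoop P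
              (Pf arr2 lo + PySem.Int.floordiv (Pf arr2 hi - Pf arr2 lo) 2) (lo+1) hi < hi ∧
              PySem.List.pyGetD P
                ((bisectLoop P (Pf arr2 lo + PySem.Int.floordiv (Pf arr2 hi - Pf arr2 lo) 2)
                  (lo+1) hi : Nat) : Int) 0
                = Pf arr2 lo + PySem.Int.floordiv (Pf arr2 hi - Pf arr2 lo) 2) := by
            rintro ⟨hrhi, hrt⟩
            set r := bisectLoop P (Pf arr2 lo + PySem.Int.floordiv (Pf arr2 hi - Pf arr2 lo) 2)
              (lo+1) hi with hrdef
            rw [hPm r (by omega)] at hrt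
            rw [PySem.Int.floordiv_eq_ediv_of_pos (by norm_num)] at hrt
            exact hsplit ⟨r, by omega, hrhi, by omega⟩
          rw [if_neg hcond]
        · rw [if_pos hmod]

-- ===== VERDICT (by name: the statement is the Claim_ definition above) =====
theorem arraySplitting_spec : Claim_equal_arraySplitting := by
  intro arr _
  unfold Spec_arraySplitting arraySplitting arraySplitting_alt
  by_cases hz : arr.all (fun a => a == 0)
  · simp [hz]
  · simp only [hz, Bool.false_eq_true, if_false]
    have hP := buildP_eq arr
    have hlen : (buildP arr).length = (arr.filter (fun a => 0 < a)).length + 1 := by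
      rw [hP]; simp [length_prefFrom]
    have hm := main_lemma (arr.filter (fun a => 0 < a))
        (by intro x hx
            simp only [List.mem_filter] at hx
            exact of_decide_eq_true hx.2)
        (buildP arr) hP ((arr.filter (fun a => 0 < a)).length + 1)
        ((arr.filter (fun a => 0 < a)).length + 1) 0 (arr.filter (fun a => 0 < a)).length
        (Nat.zero_le _) le_rfl (by omega) (by omega)
    simp only [Nat.cast_zero] at hm
    rw [hm, hlen]
    congr 1
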